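-- pv_equiv track=rewrite | github.com/Shin-John/IMC-Prosperity-2024-Umich | manual_trade.py | find_optimal_bids
-- ===== SOURCE A (Python) =====
-- def find_optimal_bids(hashmap):
--     max_profit = 0
--     optimal_low = 0
--     optimal_high = 0
--     selling_price = 1000
--     for low_bid in range(900, 1001):
--         for high_bid in range(low_bid + 1, 1001):
--             profit = 0
--             items_bought = 0
--             for key, frequency in hashmap.items():
--                 if low_bid >= key:
--                     profit += (selling_price - low_bid) * frequency
--                     items_bought += frequency
--                 elif high_bid >= key:
--                     profit += (selling_price - high_bid) * frequency
--                     items_bought += frequency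
--             if profit > max_profit:
--                 max_profit = profit
--                 optimal_low = low_bid
--                 optimal_high = high_bid
--     return optimal_low, optimal_high, max_profit
-- ===== SOURCE B (Python) =====
-- def find_optimal_bids(hashmap):
--     # Precompute cumulative frequencies S[i] = total frequency of keys <= 900 + i,
--     # then score each (low, high) pair in O(1) instead of rescanning the histogram.
--     items = list(hashmap.items())
--     S = [sum(f for k, f in items if k <= 900 + i) for i in range(101)]
--     best_low, best_high, best_profit = 0, 0, 0
--     for low in range(900, 1001):
--         for high in range(low + 1, 1001):
--             profit = (1000 - low) * S[low - 900] + (1000 - high) * (S[high - 900] - S[low - 900])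
--             if profit > best_profit:
--                 best_low, best_high, best_profit = low, high, profit
--     return best_low, best_high, best_profit
-- ===== Notes on version B (the rewrite author's own statement) =====
-- stated objective: faster
-- what changed: Replaces the O(101^2 * m) rescan of the histogram for every (low,high) pair by a precomputed cumulative-frequency table S[i] = total frequency of keys <= 900+i, scoring each pair in O(1).
import Mathlib
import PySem

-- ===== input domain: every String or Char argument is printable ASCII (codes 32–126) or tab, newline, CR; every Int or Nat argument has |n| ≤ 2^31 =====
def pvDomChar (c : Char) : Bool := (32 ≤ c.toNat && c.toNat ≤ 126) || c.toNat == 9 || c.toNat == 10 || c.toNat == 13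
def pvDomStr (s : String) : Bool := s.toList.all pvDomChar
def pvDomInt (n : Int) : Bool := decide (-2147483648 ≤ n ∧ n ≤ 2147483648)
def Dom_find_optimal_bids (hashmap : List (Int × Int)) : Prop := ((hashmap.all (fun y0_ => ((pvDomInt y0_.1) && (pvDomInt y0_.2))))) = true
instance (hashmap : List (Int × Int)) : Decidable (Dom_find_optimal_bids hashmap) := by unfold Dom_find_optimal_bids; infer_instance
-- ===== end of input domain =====

-- B replaces A's per-pair rescan of the histogram by a precomputed cumulative-frequency table (faster).

-- ===== PORT A =====
-- the inner 'for key, frequency in hashmap.items()' loop of A, accumulating (profit, items_bought)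
def pvInnerA (items : List (Int × Int)) (low high : Int) : Int × Int :=
  items.foldl (fun (st : Int × Int) kv =>
    if low ≥ kv.1 then (st.1 + (1000 - low) * kv.2, st.2 + kv.2)
    else if high ≥ kv.1 then (st.1 + (1000 - high) * kv.2, st.2 + kv.2)
    else st) (0, 0)

-- state = (optimal_low, optimal_high, max_profit); selling_price = 1000
def find_optimal_bids (hashmap : List (Int × Int)) : Int × Int × Int :=
  let items := (PySem.Dict.ofList hashmap).items
  (PySem.List.pyRange 900 1001 1).foldl (fun (st : Int × Int × Int) low =>
    (PySem.List.pyRange (low + 1) 1001 1).foldl (fun (st : Int × Int × Int) high =>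
      let pr := pvInnerA items low high
      if pr.1 > st.2.2 then (low, high, pr.1) else st) st) (0, 0, 0)

-- ===== PORT B =====
def find_optimal_bids_alt (hashmap : List (Int × Int)) : Int × Int × Int :=
  let items := (PySem.Dict.ofList hashmap).items
  let S := (PySem.List.pyRange 0 101 1).map (fun i =>
    ((items.filter (fun kv => kv.1 ≤ 900 + i)).map (fun kv => kv.2)).sum)
  (PySem.List.pyRange 900 1001 1).foldl (fun (st : Int × Int × Int) low =>
    (PySem.List.pyRange (low + 1) 1001 1).foldl (fun (st : Int × Int × Int) high =>
      let profit := (1000 - low) * PySem.List.pyGetD S (low - 900) 0 +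
        (1000 - high) * (PySem.List.pyGetD S (high - 900) 0 - PySem.List.pyGetD S (low - 900) 0)
      if profit > st.2.2 then (low, high, profit) else st) st) (0, 0, 0)

-- ===== PRECONDITION & SPEC =====
def Spec_find_optimal_bids (hashmap : List (Int × Int)) (out : Int × Int × Int) : Prop := out = find_optimal_bids_alt hashmap
instance (hashmap : List (Int × Int)) (out : Int × Int × Int) : Decidable (Spec_find_optimal_bids hashmap out) := by unfold Spec_find_optimal_bids; infer_instance

-- ===== CLAIM (what is proved, stated in full; the proofs are below) =====
def Claim_equal_find_optimal_bids : Prop := ∀ (hashmap : List (Int × Int)), Dom_find_optimal_bids hashmap → Spec_find_optimal_bids hashmap (find_optimal_bids hashmap)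

-- ===== LEMMAS AND PROOFS =====

-- total frequency of items with key ≤ x
def pvCle (x : Int) (items : List (Int × Int)) : Int :=
  (items.map (fun kv => if kv.1 ≤ x then kv.2 else 0)).sum

lemma pvFilterSum (x : Int) (items : List (Int × Int)) :
    ((items.filter (fun kv => kv.1 ≤ 900 + x)).map (fun kv => kv.2)).sum = pvCle (900 + x) items := by
  induction items with
  | nil => rfl
  | cons kv t ih =>
    simp only [pvCle, List.filter_cons, List.map_cons, List.sum_cons] at *
    by_cases h : kv.1 ≤ 900 + x <;> simp [h, ih]

lemma pvInnerA_fst (items : List (Int × Int)) (low high : Int) (hlh : low < high) :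
    (pvInnerA items low high).1 =
      (1000 - low) * pvCle low items + (1000 - high) * (pvCle high items - pvCle low items) := by
  suffices h : ∀ st : Int × Int,
      (items.foldl (fun (st : Int × Int) kv =>
        if low ≥ kv.1 then (st.1 + (1000 - low) * kv.2, st.2 + kv.2)
        else if high ≥ kv.1 then (st.1 + (1000 - high) * kv.2, st.2 + kv.2)
        else st) st).1 =
      st.1 + (1000 - low) * pvCle low items + (1000 - high) * (pvCle high items - pvCle low items) by
    simpa [pvInnerA] using h (0, 0)
  induction items with
  | nil => intro st; simp [pvCle]
  | cons kv t ih =>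
    intro st
    simp only [List.foldl_cons, pvCle, List.map_cons, List.sum_cons]
    by_cases h1 : low ≥ kv.1
    · simp only [if_pos h1, ih, pvCle, if_pos (show kv.1 ≤ high by omega)]
      ring
    · by_cases h2 : high ≥ kv.1
      · simp only [if_neg h1, if_pos h2, ih, pvCle]
        ring
      · simp only [if_neg h1, if_neg h2, ih, pvCle]
        ring

lemma pvS_get (items : List (Int × Int)) (i : Int) (h0 : 0 ≤ i) (h1 : i < 101) :
    PySem.List.pyGetD ((PySem.List.pyRange 0 101 1).map (fun i =>
        ((items.filter (fun kv => kv.1 ≤ 900 + i)).map (fun kv => kv.2)).sum)) i 0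
      = pvCle (900 + i) items := by
  rw [PySem.List.pyGetD_map_pyRange_of_nonneg _ _ _ _ h0 h1, pvFilterSum]

-- ===== VERDICT (by name: the statement is the Claim_ definition above) =====
theorem find_optimal_bids_spec : Claim_equal_find_optimal_bids := by
  intro hashmap _
  unfold Spec_find_optimal_bids find_optimal_bids find_optimal_bids_alt
  apply PySem.List.foldl_congr_mem'
  intro low hlow st
  apply PySem.List.foldl_congr_mem'
  intro high hhigh st'
  rw [PySem.List.mem_pyRange_one] at hlow hhigh
  have hlh : low < high := by omega
  dsimp only
  rw [pvInnerA_fst _ _ _ hlh,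
      pvS_get _ (low - 900) (by omega) (by omega),
      pvS_get _ (high - 900) (by omega) (by omega)]
  have e1 : 900 + (low - 900) = low := by ring
  have e2 : 900 + (high - 900) = high := by ring
  rw [e1, e2]
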